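-- pv_equiv track=rewrite | github.com/bojkata1/Softuni-advanced | Workshop/Console Tic-Tac-Toe.py | is_col_win_possible
-- ===== SOURCE A (Python) =====
-- def is_col_win_possible(board_):
--     columns = []
--     for col_ in range(len(board_)):
--         current_col = []
--         for row_ in range(len(board_)):
--             current_col.append(board_[row_][col_])
--         columns.append(current_col)
--     if all('X' in col_ and 'O' in col_ for col_ in columns):
--         return False
--     return True
-- ===== SOURCE B (Python) =====
-- def is_col_win_possible(board_):
--     n = len(board_)
--     x_mask = 0
--     o_mask = 0
--     for row in board_:
--         for col_ in range(n):
--             cell = row[col_]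
--             if cell == 'X':
--                 x_mask |= 1 << col_
--             elif cell == 'O':
--                 o_mask |= 1 << col_
--     return (x_mask & o_mask) != (1 << n) - 1
-- ===== Notes on version B (the rewrite author's own statement) =====
-- stated objective: alternative
-- what changed: Instead of materializing the transpose and testing each column's membership of both marks, B makes a single row-major pass accumulating two per-column bitmask integers (bit c set iff column c has seen X resp. O) and decides the answer by comparing x_mask & o_mask against the full mask (1<<n)-1.
import Mathlib
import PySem

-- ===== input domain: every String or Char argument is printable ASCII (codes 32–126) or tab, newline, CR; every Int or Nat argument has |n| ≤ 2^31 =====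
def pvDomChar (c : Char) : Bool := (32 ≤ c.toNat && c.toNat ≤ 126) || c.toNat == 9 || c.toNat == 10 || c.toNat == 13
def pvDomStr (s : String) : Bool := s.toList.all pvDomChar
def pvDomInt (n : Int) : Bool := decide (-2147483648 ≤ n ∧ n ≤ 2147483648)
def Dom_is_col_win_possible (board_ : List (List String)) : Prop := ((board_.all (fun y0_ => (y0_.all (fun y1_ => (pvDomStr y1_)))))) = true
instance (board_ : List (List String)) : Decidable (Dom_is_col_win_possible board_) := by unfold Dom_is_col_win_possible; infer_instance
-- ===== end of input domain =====

set_option maxHeartbeats 1000000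

-- B replaces A's materialized transpose plus all(...)-membership pass by a single
-- row-major pass that accumulates two per-column bitmask integers and compares
-- x_mask & o_mask with the full mask (objective: alternative).

-- ===== PORT A =====
def is_col_win_possible (board_ : List (List String)) : Bool :=
  let n : Int := board_.length
  let columns : List (List String) :=
    (PySem.List.pyRange 0 n 1).foldl (fun cols col_ =>
      cols ++ [(PySem.List.pyRange 0 n 1).foldl (fun cur row_ =>
        cur ++ [PySem.List.pyGetD (PySem.List.pyGetD board_ row_ []) col_ ""]) []]) []
  if columns.all (fun col_ => col_.contains "X" && col_.contains "O") then false else true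

-- ===== PORT B =====
-- one step of B's inner loop: fold one column index of the current row into the two masks
def pvColStep (row : List String) (q : Nat × Nat) (col_ : Nat) : Nat × Nat :=
  let cell := PySem.List.pyGetD row (col_ : Int) ""
  if cell = "X" then (q.1 ||| (1 <<< col_), q.2)
  else if cell = "O" then (q.1, q.2 ||| (1 <<< col_)) else q

-- B's inner loop: for col_ in range(n): update (x_mask, o_mask) from row[col_]
def pvRowStep (n : Nat) (p : Nat × Nat) (row : List String) : Nat × Nat :=
  (List.range n).foldl (pvColStep row) p

def is_col_win_possible_alt (board_ : List (List String)) : Bool :=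
  let n := board_.length
  let p := board_.foldl (pvRowStep n) (0, 0)
  decide (p.1 &&& p.2 ≠ (1 <<< n) - 1)

-- ===== PRECONDITION & SPEC =====
-- Pre_ excludes exactly the ragged boards with some row shorter than len(board_),
-- on which Python A raises IndexError while building the transpose.
def Pre_is_col_win_possible (board_ : List (List String)) : Prop :=
  ∀ row ∈ board_, board_.length ≤ row.length
instance (board_ : List (List String)) : Decidable (Pre_is_col_win_possible board_) := by
  unfold Pre_is_col_win_possible; infer_instance

def pvWitness_is_col_win_possible : List (List String) := [["X", "O"], ["O", "X"]]

def Spec_is_col_win_possible (board_ : List (List String)) (out : Bool) : Prop := out = is_col_win_possible_alt board_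
instance (board_ : List (List String)) (out : Bool) : Decidable (Spec_is_col_win_possible board_ out) := by unfold Spec_is_col_win_possible; infer_instance

-- ===== CLAIM (what is proved, stated in full; the proofs are below) =====
def Claim_equal_is_col_win_possible : Prop := ∀ (board_ : List (List String)), Dom_is_col_win_possible board_ → Pre_is_col_win_possible board_ → Spec_is_col_win_possible board_ (is_col_win_possible board_)

-- ===== LEMMAS AND PROOFS =====

-- cell board_[row_][col_] as A reads it
def pvCellA (board_ : List (List String)) (row_ col_ : Nat) : String :=
  PySem.List.pyGetD (PySem.List.pyGetD board_ (row_ : Int) []) (col_ : Int) ""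

-- column col_ of the board, as A materializes it
def pvCol (board_ : List (List String)) (n col_ : Nat) : List String :=
  (List.range n).map (fun row_ => pvCellA board_ row_ col_)

theorem pvFlatMapSingleton {α β : Type} (f : α → β) (l : List α) :
    (l.map (fun a => [f a])).flatten = l.map f := by
  induction l with
  | nil => rfl
  | cons x xs ih => simp [ih]

theorem pvRangeCast (n : Nat) :
    PySem.List.pyRange 0 (n : Int) 1 = (List.range n).map (fun k => (k : Int)) := by
  rw [PySem.List.pyRange_zero_nat]; simp [List.flatMap_def, pvFlatMapSingleton]

theorem pvIfNot (b : Bool) : (if b then false else true) = !b := by cases b <;> rfl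

-- A computes the negation of "every column contains both marks"
theorem pvA_eq (board_ : List (List String)) :
    is_col_win_possible board_ =
      ! ((List.range board_.length).all (fun col_ =>
          (pvCol board_ board_.length col_).contains "X" &&
          (pvCol board_ board_.length col_).contains "O")) := by
  unfold is_col_win_possible
  dsimp only
  rw [pvIfNot, pvRangeCast]
  simp only [PySem.List.foldl_append_singleton_eq_map, List.nil_append, List.map_map,
    List.all_map, Function.comp_def, pvCol, pvCellA]
  simp [pvFlatMapSingleton, List.flatMap_def, Function.comp_def]

theorem pvMemCol (board_ : List (List String)) (n c : Nat) (s : String) :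
    s ∈ pvCol board_ n c ↔ ∃ r < n, pvCellA board_ r c = s := by
  simp [pvCol]

-- A is true iff some column misses X or misses O
theorem pvA_iff (board_ : List (List String)) :
    is_col_win_possible board_ = true ↔
      ¬ (∀ c < board_.length,
          (∃ r < board_.length, pvCellA board_ r c = "X") ∧
          (∃ r < board_.length, pvCellA board_ r c = "O")) := by
  rw [pvA_eq]
  have hall : ((List.range board_.length).all (fun col_ =>
      (pvCol board_ board_.length col_).contains "X" &&
      (pvCol board_ board_.length col_).contains "O")) = true ↔
      (∀ c < board_.length,
          (∃ r < board_.length, pvCellA board_ r c = "X") ∧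
          (∃ r < board_.length, pvCellA board_ r c = "O")) := by
    simp only [List.all_eq_true, List.mem_range, Bool.and_eq_true, List.contains_iff_mem,
      pvMemCol]
  cases h : ((List.range board_.length).all (fun col_ =>
      (pvCol board_ board_.length col_).contains "X" &&
      (pvCol board_ board_.length col_).contains "O")) with
  | true =>
    simp only [h, Bool.not_true]
    exact iff_of_false (by simp) (not_not_intro (hall.mp h))
  | false =>
    simp only [h, Bool.not_false, true_iff]
    intro hcontra
    rw [hall.mpr hcontra] at h
    exact Bool.true_eq_false.mp h

-- bit c of the masks after folding one column index
theorem pvColStep_testBit (row : List String) (q : Nat × Nat) (k c : Nat) :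
    ((pvColStep row q k).1.testBit c = true ↔
      (q.1.testBit c = true ∨ (k = c ∧ row[c]?.getD "" = "X"))) ∧
    ((pvColStep row q k).2.testBit c = true ↔
      (q.2.testBit c = true ∨ (k = c ∧ row[c]?.getD "" = "O"))) := by
  by_cases hkc : k = c <;>
    [(subst hkc;
      by_cases hx : row[k]?.getD "" = "X" <;> by_cases ho : row[k]?.getD "" = "O" <;>
        simp [pvColStep, hx, ho, Nat.one_shiftLeft, Nat.testBit_or, Nat.testBit_two_pow]);
     (have hbit : (1 <<< k).testBit c = false := by
        simp [Nat.one_shiftLeft, Nat.testBit_two_pow, hkc]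
      by_cases hx : row[k]?.getD "" = "X" <;> by_cases ho : row[k]?.getD "" = "O" <;>
        simp [pvColStep, hx, ho, hkc, Nat.testBit_or, hbit])]

-- bit c of the masks after B's inner loop over a list of column indices
theorem pvFoldCols (row : List String) (l : List Nat) (p : Nat × Nat) (c : Nat) :
    ((l.foldl (pvColStep row) p).1.testBit c = true ↔
      (p.1.testBit c = true ∨ (c ∈ l ∧ row[c]?.getD "" = "X"))) ∧
    ((l.foldl (pvColStep row) p).2.testBit c = true ↔
      (p.2.testBit c = true ∨ (c ∈ l ∧ row[c]?.getD "" = "O"))) := by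
  induction l generalizing p with
  | nil => simp
  | cons k l ih =>
    obtain ⟨ih1, ih2⟩ := ih (pvColStep row p k)
    obtain ⟨h1, h2⟩ := pvColStep_testBit row p k c
    rw [List.foldl_cons]
    constructor
    · rw [ih1, h1]
      simp only [List.mem_cons]
      constructor
      · rintro ((h | ⟨hk, hx⟩) | ⟨hl, hx⟩)
        · exact Or.inl h
        · exact Or.inr ⟨Or.inl hk.symm, hx⟩
        · exact Or.inr ⟨Or.inr hl, hx⟩
      · rintro (h | ⟨(hk | hl), hx⟩)
        · exact Or.inl (Or.inl h)
        · exact Or.inl (Or.inr ⟨hk.symm, hx⟩)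
        · exact Or.inr ⟨hl, hx⟩
    · rw [ih2, h2]
      simp only [List.mem_cons]
      constructor
      · rintro ((h | ⟨hk, hx⟩) | ⟨hl, hx⟩)
        · exact Or.inl h
        · exact Or.inr ⟨Or.inl hk.symm, hx⟩
        · exact Or.inr ⟨Or.inr hl, hx⟩
      · rintro (h | ⟨(hk | hl), hx⟩)
        · exact Or.inl (Or.inl h)
        · exact Or.inl (Or.inr ⟨hk.symm, hx⟩)
        · exact Or.inr ⟨hl, hx⟩

-- bit c of the masks after B's pass over the rows
theorem pvFoldRows (rows : List (List String)) (n : Nat) (p : Nat × Nat) (c : Nat) :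
    ((rows.foldl (pvRowStep n) p).1.testBit c = true ↔
      (p.1.testBit c = true ∨ (c < n ∧ ∃ row ∈ rows, row[c]?.getD "" = "X"))) ∧
    ((rows.foldl (pvRowStep n) p).2.testBit c = true ↔
      (p.2.testBit c = true ∨ (c < n ∧ ∃ row ∈ rows, row[c]?.getD "" = "O"))) := by
  induction rows generalizing p with
  | nil => simp
  | cons row rows ih =>
    obtain ⟨ih1, ih2⟩ := ih (pvRowStep n p row)
    obtain ⟨h1, h2⟩ := pvFoldCols row (List.range n) p c
    rw [List.foldl_cons]
    constructor
    · rw [ih1]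
      unfold pvRowStep
      rw [h1]
      simp only [List.mem_range, List.mem_cons]
      constructor
      · rintro ((h | ⟨hc, hx⟩) | ⟨hc, r, hr, hx⟩)
        · exact Or.inl h
        · exact Or.inr ⟨hc, row, Or.inl rfl, hx⟩
        · exact Or.inr ⟨hc, r, Or.inr hr, hx⟩
      · rintro (h | ⟨hc, r, (rfl | hr), hx⟩)
        · exact Or.inl (Or.inl h)
        · exact Or.inl (Or.inr ⟨hc, hx⟩)
        · exact Or.inr ⟨hc, r, hr, hx⟩
    · rw [ih2]
      unfold pvRowStep
      rw [h2]
      simp only [List.mem_range, List.mem_cons]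
      constructor
      · rintro ((h | ⟨hc, hx⟩) | ⟨hc, r, hr, hx⟩)
        · exact Or.inl h
        · exact Or.inr ⟨hc, row, Or.inl rfl, hx⟩
        · exact Or.inr ⟨hc, r, Or.inr hr, hx⟩
      · rintro (h | ⟨hc, r, (rfl | hr), hx⟩)
        · exact Or.inl (Or.inl h)
        · exact Or.inl (Or.inr ⟨hc, hx⟩)
        · exact Or.inr ⟨hc, r, hr, hx⟩

-- B is true iff some column misses X or misses O (existential form of the mask test)
theorem pvB_iff (board_ : List (List String)) :
    is_col_win_possible_alt board_ = true ↔
      ¬ (∀ c < board_.length,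
          (∃ row ∈ board_, row[c]?.getD "" = "X") ∧
          (∃ row ∈ board_, row[c]?.getD "" = "O")) := by
  unfold is_col_win_possible_alt
  simp only [decide_eq_true_eq]
  set n := board_.length with hn
  set p := board_.foldl (pvRowStep n) (0, 0) with hp
  have hbits : ∀ c : Nat,
      (p.1.testBit c = true ↔ (c < n ∧ ∃ row ∈ board_, row[c]?.getD "" = "X")) ∧
      (p.2.testBit c = true ↔ (c < n ∧ ∃ row ∈ board_, row[c]?.getD "" = "O")) := by
    intro c
    obtain ⟨h1, h2⟩ := pvFoldRows board_ n (0, 0) c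
    constructor
    · rw [hp, h1]; simp
    · rw [hp, h2]; simp
  have hfull : (p.1 &&& p.2 = (1 <<< n) - 1) ↔
      ∀ c < n, ((∃ row ∈ board_, row[c]?.getD "" = "X") ∧
                (∃ row ∈ board_, row[c]?.getD "" = "O")) := by
    constructor
    · intro h c hc
      have := congrArg (fun m => m.testBit c) h
      simp only [Nat.testBit_and, Nat.one_shiftLeft, Nat.testBit_two_pow_sub_one, hc,
        decide_true] at this
      rw [Bool.and_eq_true] at this
      obtain ⟨hx, ho⟩ := this
      exact ⟨((hbits c).1.mp hx).2, ((hbits c).2.mp ho).2⟩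
    · intro h
      rw [Nat.one_shiftLeft]
      apply Nat.eq_of_testBit_eq
      intro c
      rw [Nat.testBit_two_pow_sub_one, Nat.testBit_and, Bool.eq_iff_iff]
      simp only [Bool.and_eq_true, (hbits c).1, (hbits c).2, decide_eq_true_eq]
      constructor
      · rintro ⟨⟨hc, _⟩, _⟩; exact hc
      · intro hc; obtain ⟨hx, ho⟩ := h c hc; exact ⟨⟨hc, hx⟩, ⟨hc, ho⟩⟩
  constructor
  · intro hne hall; exact hne (hfull.mpr hall)
  · intro hnall h; exact hnall (hfull.mp h)

-- A's doubly-indexed cell equals B's cell of the member row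
theorem pvExists_row_iff (board_ : List (List String)) (c : Nat) (s : String) :
    (∃ r < board_.length, pvCellA board_ r c = s) ↔
    (∃ row ∈ board_, row[c]?.getD "" = s) := by
  constructor
  · rintro ⟨r, hr, he⟩
    refine ⟨board_[r], List.getElem_mem hr, ?_⟩
    rw [← he]
    simp [pvCellA, List.getElem?_eq_getElem hr]
  · rintro ⟨row, hrow, he⟩
    obtain ⟨r, hr, hget⟩ := List.mem_iff_getElem.mp hrow
    refine ⟨r, hr, ?_⟩
    simp [pvCellA, List.getElem?_eq_getElem hr, hget, he]

-- ===== VERDICT (by name: the statement is the Claim_ definition above) =====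
theorem is_col_win_possible_spec : Claim_equal_is_col_win_possible := by
  intro board_ _ _
  unfold Spec_is_col_win_possible
  rw [Bool.eq_iff_iff, pvA_iff, pvB_iff]
  constructor
  · intro h hall
    exact h (fun c hc => by
      obtain ⟨hx, ho⟩ := hall c hc
      exact ⟨(pvExists_row_iff board_ c "X").mpr hx, (pvExists_row_iff board_ c "O").mpr ho⟩)
  · intro h hall
    exact h (fun c hc => by
      obtain ⟨hx, ho⟩ := hall c hc
      exact ⟨(pvExists_row_iff board_ c "X").mp hx, (pvExists_row_iff board_ c "O").mp ho⟩)
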